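-- pv_equiv track=rewrite | github.com/TomasRacil/Python | Zaklady/Scripty/00Testy/prvni_test.py | druhy_algoritmus
-- ===== SOURCE A (Python) =====
-- def druhy_algoritmus(pole: list[list[int]], prijmeni: str) -> tuple[int, int, int]:
--     """
--     Druhý algoritmus
--
--     Args:
--             pole (list[list[int]]): 2D pole k vyhodnocení
--             prijmeni (str): přijmení
--
--     Returns:
--             tuple[int,int]: vrací maximum, minimum a počet shod v matici
--     """
--     maximum, minimum, pocet = pole[0][0], pole[0][0], 0
--     for radek in pole:
--         for prvek in radek:
--             if prvek == len(prijmeni):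
--                 pocet += 1
--             if prvek < minimum:
--                 minimum = prvek
--             elif prvek > maximum:
--                 maximum = prvek
--     return maximum, minimum, pocet
-- ===== SOURCE B (Python) =====
-- def druhy_algoritmus(pole: list[list[int]], prijmeni: str) -> tuple[int, int, int]:
--     flat = [prvek for radek in pole for prvek in radek]
--     return max(flat), min(flat), flat.count(len(prijmeni))
-- ===== Notes on version B (the rewrite author's own statement) =====
-- stated objective: idiomatic
-- what changed: Replaces A's single fused accumulator loop (max/min/count seeded from pole[0][0] and updated element by element) with flattening the matrix once and computing the three results with the built-ins max, min and list.count; Pre_ excludes matrices whose first row is empty or absent, on which A raises IndexError.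
-- crash fix: When the first row is empty but the matrix still contains elements, A raises IndexError on pole[0][0] while B returns the max/min/count of all elements. — e.g. on druhy_algoritmus([[], [1, 2]], "ab"): A raises IndexError, B returns (2, 1, 1)
import Mathlib
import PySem

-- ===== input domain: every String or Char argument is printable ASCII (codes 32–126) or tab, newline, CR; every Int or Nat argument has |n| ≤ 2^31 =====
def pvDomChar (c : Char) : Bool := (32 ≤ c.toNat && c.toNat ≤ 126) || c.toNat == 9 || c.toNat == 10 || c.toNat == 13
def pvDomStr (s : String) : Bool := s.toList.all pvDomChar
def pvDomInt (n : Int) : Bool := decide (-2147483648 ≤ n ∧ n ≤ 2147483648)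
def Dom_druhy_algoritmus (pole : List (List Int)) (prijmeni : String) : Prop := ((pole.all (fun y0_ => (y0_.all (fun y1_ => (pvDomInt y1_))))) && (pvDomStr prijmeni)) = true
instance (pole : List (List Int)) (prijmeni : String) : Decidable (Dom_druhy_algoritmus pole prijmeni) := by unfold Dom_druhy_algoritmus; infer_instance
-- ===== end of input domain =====

-- B flattens the matrix once and uses built-in max/min/count instead of A's fused accumulator loop (objective: idiomatic).

-- ===== PORT A =====
def druhy_algoritmus (pole : List (List Int)) (prijmeni : String) : Int × Int × Int :=
  -- maximum, minimum, pocet = pole[0][0], pole[0][0], 0  (in range under Pre_)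
  let seed : Int := ((PySem.List.pyGet? pole 0).getD []).headD 0
  pole.foldl (fun st radek =>
    radek.foldl (fun (st : Int × Int × Int) prvek =>
      let pocet := if prvek = (PySem.Str.len prijmeni : Int) then st.2.2 + 1 else st.2.2
      if prvek < st.2.1 then (st.1, prvek, pocet)
      else if prvek > st.1 then (prvek, st.2.1, pocet)
      else (st.1, st.2.1, pocet)) st) (seed, seed, 0)

-- ===== PORT B =====
def druhy_algoritmus_alt (pole : List (List Int)) (prijmeni : String) : Int × Int × Int :=
  let flat : List Int := pole.flatMap (fun radek => radek)
  -- max(flat)/min(flat) raise ValueError on an empty flat; nonempty under Pre_ (.getD 0 unreachable there)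
  ((PySem.List.max? flat (fun y => y)).getD 0,
   (PySem.List.min? flat (fun y => y)).getD 0,
   (PySem.List.count flat (PySem.Str.len prijmeni : Int) : Int))

-- ===== PRECONDITION & SPEC =====
-- A raises IndexError (pole[0][0]) when the matrix is empty or its first row is empty; exactly those inputs are excluded.
def Pre_druhy_algoritmus (pole : List (List Int)) (prijmeni : String) : Prop :=
  pole ≠ [] ∧ pole.headD [] ≠ []
instance (pole : List (List Int)) (prijmeni : String) : Decidable (Pre_druhy_algoritmus pole prijmeni) := by unfold Pre_druhy_algoritmus; infer_instance
def pvWitness_druhy_algoritmus : List (List Int) × String := ([[3, 1], [2]], "ab")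

-- When the first row is empty but the matrix still contains elements, A raises IndexError on pole[0][0] while B returns the max/min/count of all elements.
def Raises_druhy_algoritmus (pole : List (List Int)) (prijmeni : String) : Prop :=
  pole.headD [] = [] ∧ pole.flatMap (fun radek => radek) ≠ []
instance (pole : List (List Int)) (prijmeni : String) : Decidable (Raises_druhy_algoritmus pole prijmeni) := by unfold Raises_druhy_algoritmus; infer_instance
def pvRaiseWitness_druhy_algoritmus : List (List Int) × String := ([[], [1, 2]], "ab")
def pvRaiseWitnessOut_druhy_algoritmus : Int × Int × Int := (2, 1, 1)

def Spec_druhy_algoritmus (pole : List (List Int)) (prijmeni : String) (out : Int × Int × Int) : Prop := out = druhy_algoritmus_alt pole prijmeni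
instance (pole : List (List Int)) (prijmeni : String) (out : Int × Int × Int) : Decidable (Spec_druhy_algoritmus pole prijmeni out) := by unfold Spec_druhy_algoritmus; infer_instance

-- ===== CLAIM (what is proved, stated in full; the proofs are below) =====
def Claim_equal_druhy_algoritmus : Prop := ∀ (pole : List (List Int)) (prijmeni : String), Dom_druhy_algoritmus pole prijmeni → Pre_druhy_algoritmus pole prijmeni → Spec_druhy_algoritmus pole prijmeni (druhy_algoritmus pole prijmeni)
def Claim_raises_druhy_algoritmus : Prop := (∀ (pole : List (List Int)) (prijmeni : String), Dom_druhy_algoritmus pole prijmeni → Raises_druhy_algoritmus pole prijmeni → ¬ Pre_druhy_algoritmus pole prijmeni) ∧ (Dom_druhy_algoritmus (pvRaiseWitness_druhy_algoritmus.1) (pvRaiseWitness_druhy_algoritmus.2) ∧ Raises_druhy_algoritmus (pvRaiseWitness_druhy_algoritmus.1) (pvRaiseWitness_druhy_algoritmus.2) ∧ druhy_algoritmus_alt (pvRaiseWitness_druhy_algoritmus.1) (pvRaiseWitness_druhy_algoritmus.2) = pvRaiseWitnessOut_druhy_algoritmus)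

-- ===== LEMMAS AND PROOFS =====

-- The inner step of A's fused loop.
def pvStep (L : Int) (st : Int × Int × Int) (prvek : Int) : Int × Int × Int :=
  let pocet := if prvek = L then st.2.2 + 1 else st.2.2
  if prvek < st.2.1 then (st.1, prvek, pocet)
  else if prvek > st.1 then (prvek, st.2.1, pocet)
  else (st.1, st.2.1, pocet)

-- One row of A's loop, componentwise, provided min ≤ max holds for the state.
theorem pvStep_foldl (L : Int) (l : List Int) (mx mn ct : Int) (h : mn ≤ mx) :
    l.foldl (pvStep L) (mx, mn, ct) = (l.foldl max mx, l.foldl min mn, ct + (l.count L : Int)) := by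
  induction l generalizing mx mn ct with
  | nil => simp
  | cons x t ih =>
    simp only [List.foldl_cons, List.count_cons]
    have hx : pvStep L (mx, mn, ct) x
        = (max mx x, min mn x, ct + (if x = L then 1 else 0)) := by
      simp only [pvStep]
      split_ifs with h1 h2 h3 h4 h5 _h6 <;> simp_all <;> omega
    rw [hx, ih _ _ _ (by omega)]
    simp only [Prod.mk.injEq]
    refine ⟨trivial, trivial, ?_⟩
    by_cases hxl : x = L <;> simp [hxl]; ring

theorem pvA_foldl (L : Int) (rows : List (List Int)) (mx mn ct : Int) (h : mn ≤ mx) :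
    rows.foldl (fun st radek => radek.foldl (pvStep L) st) (mx, mn, ct)
      = ((rows.flatMap (fun r => r)).foldl max mx,
         (rows.flatMap (fun r => r)).foldl min mn,
         ct + ((rows.flatMap (fun r => r)).count L : Int)) := by
  induction rows generalizing mx mn ct with
  | nil => simp
  | cons r rs ih =>
    simp only [List.foldl_cons, List.flatMap_cons]
    rw [pvStep_foldl L r mx mn ct h, ih _ _ _ ?_]
    · simp [List.foldl_append, List.count_append]; ring_nf
    · calc r.foldl min mn ≤ mn := by
            clear ih h; induction r generalizing mn with
            | nil => simp
            | cons a t iht => simpa using le_trans (iht (min mn a)) (min_le_left mn a)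
        _ ≤ mx := h
        _ ≤ r.foldl max mx := by
            clear ih h; induction r generalizing mx with
            | nil => simp
            | cons a t iht => simpa using le_trans (le_max_left mx a) (iht (max mx a))

-- ===== VERDICT (by name: the statement is the Claim_ definition above) =====
theorem druhy_algoritmus_spec : Claim_equal_druhy_algoritmus := by
  intro pole prijmeni _ hpre
  obtain ⟨hne, hrow⟩ := hpre
  obtain ⟨r0, rs, rfl⟩ := List.exists_cons_of_ne_nil hne
  obtain ⟨a, t, rfl⟩ := List.exists_cons_of_ne_nil (by simpa using hrow)
  unfold Spec_druhy_algoritmus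
  have hseed : (((PySem.List.pyGet? ((a :: t) :: rs) 0).getD []).headD 0 : Int) = a := by
    simp [PySem.List.pyGet?, PySem.List.pyIdx?]
  simp only [druhy_algoritmus, druhy_algoritmus_alt, hseed]
  have hA := pvA_foldl (PySem.Str.len prijmeni : Int) ((a :: t) :: rs) a a 0 le_rfl
  have hflat : ((a :: t) :: rs).flatMap (fun r => r) = a :: (t ++ rs.flatMap (fun r => r)) := by
    simp
  rw [show (fun (st : Int × Int × Int) prvek =>
      let pocet := if prvek = (PySem.Str.len prijmeni : Int) then st.2.2 + 1 else st.2.2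
      if prvek < st.2.1 then (st.1, prvek, pocet)
      else if prvek > st.1 then (prvek, st.2.1, pocet)
      else (st.1, st.2.1, pocet)) = pvStep (PySem.Str.len prijmeni : Int) from rfl] at *
  rw [hA, hflat, PySem.List.max?_id_cons, PySem.List.min?_id_cons]
  simp [PySem.List.count]

@[simp] theorem druhy_algoritmus_raises : Claim_raises_druhy_algoritmus := by
  unfold Claim_raises_druhy_algoritmus
  exact ⟨fun pole prijmeni _ hr hpre => hpre.2 hr.1, by decide⟩
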